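-- pv_equiv track=rewrite | github.com/yong922/travel_proj | utils.py | calculate_ele_differ4
-- ===== SOURCE A (Python) =====
-- def calculate_ele_differ4(user_row, tour_df):
--     max_user_row = max(user_row)
--     max_tour_value = max(tour_df)
--     score = 0
--     for col1, col2 in zip(user_row, tour_df):
--         if col1 == max_user_row and col2 == max_tour_value:
--             score = 1
--             break
--     return score
-- ===== SOURCE B (Python) =====
-- def calculate_ele_differ4(user_row, tour_df):
--     m1 = max(user_row)
--     m2 = max(tour_df)
--     n = min(len(user_row), len(tour_df))
--     hits1 = {i for i in range(n) if user_row[i] == m1}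
--     hits2 = {i for i in range(n) if tour_df[i] == m2}
--     return 1 if hits1 & hits2 else 0
-- ===== Notes on version B (the rewrite author's own statement) =====
-- stated objective: alternative
-- what changed: Instead of scanning zipped pairs with an early break, B builds the set of indices where each list attains its own maximum (over the common prefix) and returns 1 iff those two index sets intersect.
import Mathlib
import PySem

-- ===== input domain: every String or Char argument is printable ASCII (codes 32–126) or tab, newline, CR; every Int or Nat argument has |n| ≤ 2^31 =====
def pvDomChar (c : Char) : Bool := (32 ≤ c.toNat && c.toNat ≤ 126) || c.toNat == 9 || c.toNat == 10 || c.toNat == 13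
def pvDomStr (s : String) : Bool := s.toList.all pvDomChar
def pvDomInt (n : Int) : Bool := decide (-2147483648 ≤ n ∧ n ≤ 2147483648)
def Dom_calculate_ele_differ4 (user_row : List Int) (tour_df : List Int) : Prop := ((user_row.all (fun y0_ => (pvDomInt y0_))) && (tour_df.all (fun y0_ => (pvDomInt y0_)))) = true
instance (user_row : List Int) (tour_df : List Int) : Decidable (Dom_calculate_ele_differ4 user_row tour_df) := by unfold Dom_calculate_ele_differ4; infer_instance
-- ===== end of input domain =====

-- B replaces A's early-break scan over zipped pairs by intersecting the index sets where each list attains its maximum over the common prefix (alternative decomposition; same cost).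


-- ===== PORT A =====
-- the 'for col1, col2 in zip(...)' loop with break, as structural recursion over the zipped list
def pvLoopA (m1 m2 : Int) : List (Int × Int) → Int
  | [] => 0
  | (c1, c2) :: rest => if c1 = m1 ∧ c2 = m2 then 1 else pvLoopA m1 m2 rest

def calculate_ele_differ4 (user_row : List Int) (tour_df : List Int) : Int :=
  match PySem.List.max? user_row (fun x => x), PySem.List.max? tour_df (fun x => x) with
  | some max_user_row, some max_tour_value => pvLoopA max_user_row max_tour_value (user_row.zip tour_df)
  | _, _ => 0  -- unreachable under Pre_ (Python raises ValueError on an empty list)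

-- ===== PORT B =====
-- set comprehensions over range(n): built in range order via Set.ofList of the filtered range;
-- user_row[i] with 0 ≤ i < length is exactly List.getD i 0
def calculate_ele_differ4_alt (user_row : List Int) (tour_df : List Int) : Int :=
  match PySem.List.max? user_row (fun x => x) with
  | none => 0  -- unreachable under Pre_ (Python raises ValueError on an empty list)
  | some m1 =>
    match PySem.List.max? tour_df (fun x => x) with
    | none => 0  -- unreachable under Pre_
    | some m2 =>
      let n := min user_row.length tour_df.length
      let hits1 : PySem.Set Nat := PySem.Set.ofList ((List.range n).filter (fun i => user_row.getD i 0 = m1))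
      let hits2 : PySem.Set Nat := PySem.Set.ofList ((List.range n).filter (fun i => tour_df.getD i 0 = m2))
      if PySem.Set.inter hits1 hits2 ≠ [] then 1 else 0

-- ===== PRECONDITION & SPEC =====
-- Pre_ excludes exactly the inputs where Python's max([]) raises ValueError (in both A and B).
def Pre_calculate_ele_differ4 (user_row : List Int) (tour_df : List Int) : Prop :=
  user_row ≠ [] ∧ tour_df ≠ []
instance (user_row : List Int) (tour_df : List Int) : Decidable (Pre_calculate_ele_differ4 user_row tour_df) := by unfold Pre_calculate_ele_differ4; infer_instance
def pvWitness_calculate_ele_differ4 : List Int × List Int := ([1, 3, 2], [5, 2, 4])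

def Spec_calculate_ele_differ4 (user_row : List Int) (tour_df : List Int) (out : Int) : Prop := out = calculate_ele_differ4_alt user_row tour_df
instance (user_row : List Int) (tour_df : List Int) (out : Int) : Decidable (Spec_calculate_ele_differ4 user_row tour_df out) := by unfold Spec_calculate_ele_differ4; infer_instance

-- ===== CLAIM =====
def Claim_equal_calculate_ele_differ4 : Prop := ∀ (user_row : List Int) (tour_df : List Int), Dom_calculate_ele_differ4 user_row tour_df → Pre_calculate_ele_differ4 user_row tour_df → Spec_calculate_ele_differ4 user_row tour_df (calculate_ele_differ4 user_row tour_df)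

-- ===== LEMMAS AND PROOFS =====
-- A's early-break scan is exactly a membership test on the zipped list
theorem pvLoopA_eq_mem (m1 m2 : Int) (ps : List (Int × Int)) :
    pvLoopA m1 m2 ps = if (m1, m2) ∈ ps then 1 else 0 := by
  induction ps with
  | nil => simp [pvLoopA]
  | cons p rest ih =>
    obtain ⟨c1, c2⟩ := p
    simp only [pvLoopA, ih, List.mem_cons]
    by_cases h : c1 = m1 ∧ c2 = m2
    · simp [h.1, h.2]
    · have : ¬ ((m1, m2) = (c1, c2)) := by
        simp [Prod.ext_iff]; intro h1 h2; exact h ⟨h1.symm, h2.symm⟩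
      simp [h, this]

-- (m1, m2) occurs among the zipped pairs iff some common index holds both values
theorem mem_zip_iff_exists (m1 m2 : Int) (xs ys : List Int) :
    (m1, m2) ∈ xs.zip ys ↔
      ∃ i, i < min xs.length ys.length ∧ xs.getD i 0 = m1 ∧ ys.getD i 0 = m2 := by
  rw [List.mem_iff_getElem]
  constructor
  · rintro ⟨i, hi, hget⟩
    have hi' : i < min xs.length ys.length := by simpa [List.length_zip] using hi
    have hx : i < xs.length := lt_of_lt_of_le hi' (min_le_left _ _)
    have hy : i < ys.length := lt_of_lt_of_le hi' (min_le_right _ _)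
    have hpair : (xs[i], ys[i]) = (m1, m2) :=
      (List.getElem_zip (i := i) (h := hi)).symm.trans hget
    refine ⟨i, hi', ?_, ?_⟩
    · rw [List.getD, List.getElem?_eq_getElem hx]
      exact congrArg Prod.fst hpair
    · rw [List.getD, List.getElem?_eq_getElem hy]
      exact congrArg Prod.snd hpair
  · rintro ⟨i, hi, hx, hy⟩
    have hlen : i < (xs.zip ys).length := by simpa [List.length_zip] using hi
    have hx' : i < xs.length := lt_of_lt_of_le hi (min_le_left _ _)
    have hy' : i < ys.length := lt_of_lt_of_le hi (min_le_right _ _)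
    refine ⟨i, hlen, ?_⟩
    rw [List.getElem_zip]
    rw [List.getD, List.getElem?_eq_getElem hx'] at hx
    rw [List.getD, List.getElem?_eq_getElem hy'] at hy
    simp only [Option.getD_some] at hx hy
    simp [hx, hy]

-- the index sets intersect iff some common index holds both maxima
theorem inter_ne_nil_iff (m1 m2 : Int) (xs ys : List Int) :
    PySem.Set.inter
        (PySem.Set.ofList ((List.range (min xs.length ys.length)).filter
          (fun i => xs.getD i 0 = m1)))
        (PySem.Set.ofList ((List.range (min xs.length ys.length)).filter
          (fun i => ys.getD i 0 = m2))) ≠ [] ↔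
      ∃ i, i < min xs.length ys.length ∧ xs.getD i 0 = m1 ∧ ys.getD i 0 = m2 := by
  rw [← List.isEmpty_eq_false_iff, List.isEmpty_eq_false_iff_exists_mem]
  constructor
  · rintro ⟨i, hmem⟩
    simp only [PySem.Set.inter, PySem.Set.contains, List.contains_eq_mem, List.mem_filter,
      PySem.Set.mem_ofList, List.mem_range, decide_eq_true_eq] at hmem
    exact ⟨i, hmem.1.1, hmem.1.2, hmem.2.2⟩
  · rintro ⟨i, hi, hx, hy⟩
    refine ⟨i, ?_⟩
    simp only [PySem.Set.inter, PySem.Set.contains, List.contains_eq_mem, List.mem_filter,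
      PySem.Set.mem_ofList, List.mem_range, decide_eq_true_eq]
    exact ⟨⟨hi, hx⟩, hi, hy⟩

-- ===== VERDICT =====
theorem calculate_ele_differ4_spec : Claim_equal_calculate_ele_differ4 := by
  intro user_row tour_df _ _
  unfold Spec_calculate_ele_differ4 calculate_ele_differ4 calculate_ele_differ4_alt
  cases h1 : PySem.List.max? user_row (fun x => x) with
  | none => rfl
  | some m1 =>
    cases h2 : PySem.List.max? tour_df (fun x => x) with
    | none => rfl
    | some m2 =>
      show pvLoopA m1 m2 (user_row.zip tour_df) =
        (if PySem.Set.inter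
            (PySem.Set.ofList ((List.range (min user_row.length tour_df.length)).filter
              (fun i => user_row.getD i 0 = m1)))
            (PySem.Set.ofList ((List.range (min user_row.length tour_df.length)).filter
              (fun i => tour_df.getD i 0 = m2))) ≠ [] then 1 else 0)
      rw [pvLoopA_eq_mem]
      exact if_congr ((mem_zip_iff_exists m1 m2 user_row tour_df).trans
        (inter_ne_nil_iff m1 m2 user_row tour_df).symm) rfl rfl
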